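-- pv_equiv track=rewrite | github.com/gaboza12/we-are-algorithm | 724thomas/Week8 DynamicProgramming2/1823.py | solution
-- ===== SOURCE A (Python) =====
-- def solution(n, arr):
--     # DP 테이블 초기화
--     dp = [[0] * n for _ in range(n)]
--
--     # 단일 밭의 밀 수확량 초기화
--     for i in range(n):
--         dp[i][i] = arr[i] * n
--
--     # 두 밭 이상의 경우 계산
--     for length in range(2, n + 1):
--         for left in range(n - length + 1):
--             right = left + length - 1
--             year = n - length + 1
--             dp[left][right] = max(dp[left + 1][right] + arr[left] * year, dp[left][right - 1] + arr[right] * year)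
--     return dp[0][n - 1]
-- ===== SOURCE B (Python) =====
-- def solution(n, arr):
--     # Top-down memoized recursion on the interval (l, r), computed on demand
--     # from the full range down, instead of A's bottom-up table fill by length.
--     memo = {}
--
--     def rec(l, r):
--         if l == r:
--             return arr[l] * n
--         key = (l, r)
--         if key in memo:
--             return memo[key]
--         year = n - (r - l)
--         res = max(rec(l + 1, r) + arr[l] * year,
--                   rec(l, r - 1) + arr[r] * year)
--         memo[key] = res
--         return res
--
--     return rec(0, n - 1)
-- ===== Notes on version B (the rewrite author's own statement) =====
-- stated objective: alternative
-- what changed: Replaces A's bottom-up 2D table filled by increasing interval length with top-down memoized recursion rec(l, r) on demand from the full interval, memoized in a dict.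
import Mathlib
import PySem

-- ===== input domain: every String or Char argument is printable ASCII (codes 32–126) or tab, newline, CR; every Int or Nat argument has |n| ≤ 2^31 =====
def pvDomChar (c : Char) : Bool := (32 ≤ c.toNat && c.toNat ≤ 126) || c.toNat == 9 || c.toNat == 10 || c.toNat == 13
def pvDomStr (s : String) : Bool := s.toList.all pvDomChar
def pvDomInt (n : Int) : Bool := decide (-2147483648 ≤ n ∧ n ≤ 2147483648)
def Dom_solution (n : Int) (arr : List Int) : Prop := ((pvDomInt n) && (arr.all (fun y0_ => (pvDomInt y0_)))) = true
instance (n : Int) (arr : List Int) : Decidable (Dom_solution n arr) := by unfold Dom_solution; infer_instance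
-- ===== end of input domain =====

-- B replaces A's bottom-up 2D table (filled by increasing interval length) with
-- top-down memoized recursion on the interval (l, r): same asymptotic cost,
-- opposite decomposition (on-demand from the full range down, dict memo).

-- ===== PORT A =====
-- Literal port of A's bottom-up 2D table: rows are List Int, dp[i][j] via pyGetD/pySetD
-- (all indices executed under Pre_ are nonnegative and in range, where these are exact).
def solution (n : Int) (arr : List Int) : Int :=
  let dp0 := (PySem.List.pyRange 0 n 1).map (fun _ => List.replicate n.toNat (0:Int))
  let dp1 := (PySem.List.pyRange 0 n 1).foldl (fun dp i =>
      PySem.List.pySetD dp i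
        (PySem.List.pySetD (PySem.List.pyGetD dp i []) i (PySem.List.pyGetD arr i 0 * n))) dp0
  let dp2 := (PySem.List.pyRange 2 (n+1) 1).foldl (fun dp len_ =>
      (PySem.List.pyRange 0 (n - len_ + 1) 1).foldl (fun dp left =>
        let right := left + len_ - 1
        let year := n - len_ + 1
        PySem.List.pySetD dp left
          (PySem.List.pySetD (PySem.List.pyGetD dp left []) right
            (max (PySem.List.pyGetD (PySem.List.pyGetD dp (left+1) []) right 0
                    + PySem.List.pyGetD arr left 0 * year)
                 (PySem.List.pyGetD (PySem.List.pyGetD dp left []) (right-1) 0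
                    + PySem.List.pyGetD arr right 0 * year)))) dp) dp1
  PySem.List.pyGetD (PySem.List.pyGetD dp2 0 []) (n-1) 0

-- ===== PORT B =====
-- Literal port of B's rec(l, r): memo dict keyed by (l, r), recursion on the interval.
-- Python's base test 'l == r' is written 'r ≤ l' as a totality guard: on every call B
-- actually makes, l ≤ r holds, where the two tests coincide.
def solutionRecB (n : Int) (arr : List Int) (l r : Nat)
    (memo : PySem.Dict (Int × Int) Int) : Int × PySem.Dict (Int × Int) Int :=
  if _h : r ≤ l then (PySem.List.pyGetD arr (l:Int) 0 * n, memo)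
  else
    match memo.get? ((l:Int), (r:Int)) with
    | some v => (v, memo)
    | none =>
      let year := n - ((r:Int) - (l:Int))
      let p1 := solutionRecB n arr (l+1) r memo
      let p2 := solutionRecB n arr l (r-1) p1.2
      let res := max (p1.1 + PySem.List.pyGetD arr (l:Int) 0 * year)
                     (p2.1 + PySem.List.pyGetD arr (r:Int) 0 * year)
      (res, p2.2.insert ((l:Int), (r:Int)) res)
termination_by r - l
decreasing_by all_goals omega

def solution_alt (n : Int) (arr : List Int) : Int :=
  (solutionRecB n arr 0 (n - 1).toNat PySem.Dict.empty).1

-- ===== PRECONDITION & SPEC =====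
-- A raises IndexError when n < 1 (dp[0][n-1] on an empty table) or when arr has
-- fewer than n elements (arr[i]); Pre_ admits exactly the inputs where A returns.
def Pre_solution (n : Int) (arr : List Int) : Prop := 1 ≤ n ∧ n ≤ (arr.length : Int)
instance (n : Int) (arr : List Int) : Decidable (Pre_solution n arr) := by unfold Pre_solution; infer_instance
def pvWitness_solution : Int × List Int := (3, [1, -2, 3])
def Spec_solution (n : Int) (arr : List Int) (out : Int) : Prop := out = solution_alt n arr
instance (n : Int) (arr : List Int) (out : Int) : Decidable (Spec_solution n arr out) := by unfold Spec_solution; infer_instance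

-- ===== CLAIM (what is proved, stated in full; the proofs are below) =====
def Claim_equal_solution : Prop := ∀ (n : Int) (arr : List Int), Dom_solution n arr → Pre_solution n arr → Spec_solution n arr (solution n arr)

-- ===== LEMMAS AND PROOFS =====

-- The common mathematical value: best weighted harvest of the interval [l, r],
-- years counted so that a singleton is cut in year n.
def fS (n : Int) (arr : List Int) (l r : Nat) : Int :=
  if _h : r ≤ l then PySem.List.pyGetD arr (l:Int) 0 * n
  else
    let year := n - ((r:Int) - (l:Int))
    max (fS n arr (l+1) r + PySem.List.pyGetD arr (l:Int) 0 * year)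
        (fS n arr l (r-1) + PySem.List.pyGetD arr (r:Int) 0 * year)
termination_by r - l
decreasing_by all_goals omega

lemma fS_diag (n : Int) (arr : List Int) (l r : Nat) (h : r ≤ l) :
    fS n arr l r = PySem.List.pyGetD arr (l:Int) 0 * n := by
  rw [fS]; simp [h]

lemma fS_step (n : Int) (arr : List Int) (l r : Nat) (h : l < r) :
    fS n arr l r =
      max (fS n arr (l+1) r + PySem.List.pyGetD arr (l:Int) 0 * (n - ((r:Int) - (l:Int))))
          (fS n arr l (r-1) + PySem.List.pyGetD arr (r:Int) 0 * (n - ((r:Int) - (l:Int)))) := by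
  rw [fS]; simp [Nat.not_le.mpr h]

-- pyGetD with a nonnegative index is getD at toNat (both default out of range).
lemma pyGetD_toNat {α : Type} (xs : List α) (i : Int) (d : α) (h : 0 ≤ i) :
    PySem.List.pyGetD xs i d = xs.getD i.toNat d := by
  rw [← Int.toNat_of_nonneg h, PySem.List.pyGetD_natCast, Int.toNat_natCast]

lemma getD_set_self_int {α : Type} (xs : List α) (i : Nat) (v d : α) (h : i < xs.length) :
    (xs.set i v).getD i d = v := by
  simp only [List.getD]; rw [List.getElem?_set_self (by simpa using h)]; rfl

lemma getD_set_ne_int {α : Type} (xs : List α) (i j : Nat) (v d : α) (h : i ≠ j) :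
    (xs.set i v).getD j d = xs.getD j d := by
  simp [List.getD, List.getElem?_set_ne h]

-- dimensions of A's square table
def dimsA (dp : List (List Int)) (N : Nat) : Prop :=
  dp.length = N ∧ ∀ l : Nat, l < N → (dp.getD l []).length = N

lemma foldl_range_inv {σ : Type} (g : σ → Nat → σ) (P : Nat → σ → Prop) (init : σ) (m : Nat)
    (h0 : P 0 init) (hstep : ∀ k s, k < m → P k s → P (k+1) (g s k)) :
    P m ((List.range m).foldl g init) := by
  induction m with
  | zero => simpa using h0
  | succ m ih =>
    rw [List.range_succ, List.foldl_append]
    exact hstep m _ (Nat.lt_succ_self m) (ih (fun k s hk => hstep k s (Nat.lt_succ_of_lt hk)))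

-- a memo every entry of which (at a Nat-cast key) stores the fS value of that interval
def GoodMemo (n : Int) (arr : List Int) (memo : PySem.Dict (Int × Int) Int) : Prop :=
  ∀ (l r : Nat) (v : Int), memo.get? ((l:Int), (r:Int)) = some v → v = fS n arr l r

lemma recB_correct (n : Int) (arr : List Int) :
    ∀ (k l r : Nat) (memo : PySem.Dict (Int × Int) Int), r - l ≤ k → GoodMemo n arr memo →
      (solutionRecB n arr l r memo).1 = fS n arr l r ∧
      GoodMemo n arr (solutionRecB n arr l r memo).2 := by
  intro k
  induction k with
  | zero =>
    intro l r memo hk hG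
    have hrl : r ≤ l := by omega
    rw [solutionRecB, dif_pos hrl, fS_diag n arr l r hrl]
    exact ⟨rfl, hG⟩
  | succ k ih =>
    intro l r memo hk hG
    by_cases hrl : r ≤ l
    · rw [solutionRecB, dif_pos hrl, fS_diag n arr l r hrl]
      exact ⟨rfl, hG⟩
    · have hlr : l < r := by omega
      rw [solutionRecB, dif_neg hrl]
      cases hm : memo.get? ((l:Int), (r:Int)) with
      | some v => exact ⟨hG l r v hm, hG⟩
      | none =>
        have h1 := ih (l+1) r memo (by omega) hG
        have h2 := ih l (r-1) (solutionRecB n arr (l+1) r memo).2 (by omega) h1.2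
        simp only
        constructor
        · rw [fS_step n arr l r hlr, h1.1, h2.1]
        · intro l' r' v hv
          rw [PySem.Dict.get?_insert] at hv
          split_ifs at hv with he
          · have hfst : ((l':Int)) = ((l:Int)) := congrArg Prod.fst he
            have hsnd : ((r':Int)) = ((r:Int)) := congrArg Prod.snd he
            have hl : l' = l := by exact_mod_cast hfst
            have hr : r' = r := by exact_mod_cast hsnd
            cases hv
            rw [hl, hr, fS_step n arr l r hlr, h1.1, h2.1]
          · exact h2.2 l' r' v hv

lemma alt_eq (n : Int) (arr : List Int) (N : Nat) (hN : (N:Int) = n) (h1 : 1 ≤ N) :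
    solution_alt n arr = fS n arr 0 (N-1) := by
  unfold solution_alt
  have hidx : (n - 1).toNat = N - 1 := by omega
  rw [hidx]
  exact (recB_correct n arr (N-1) 0 (N-1) PySem.Dict.empty (by omega)
    (fun l r v hv => by simp [PySem.Dict.get?_empty] at hv)).1

lemma a_eq (n : Int) (arr : List Int) (N : Nat) (hN : (N:Int) = n) (h1 : 1 ≤ N) :
    solution n arr = fS n arr 0 (N-1) := by
  have hnt : n.toNat = N := by omega
  unfold solution
  have ho : ((n:Int) + 1 - 2).toNat = N - 1 := by omega
  simp only [PySem.List.pyRange_one 0 n, PySem.List.pyRange_one 2 (n+1), sub_zero, hnt, ho,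
    List.foldl_map, zero_add, List.map_map]
  rw [PySem.List.pyGetD_zero, pyGetD_toNat _ _ _ (by omega)]
  have hidx : (n - 1).toNat = N - 1 := by omega
  rw [hidx]
  refine ((foldl_range_inv _
      (fun k (dp : List (List Int)) => dimsA dp N ∧
        ∀ l r : Nat, l ≤ r → r < N → r - l ≤ k → (dp.getD l []).getD r 0 = fS n arr l r)
      _ (N-1) ?_ ?_).2 0 (N-1) (by omega) (by omega) (by omega))
  · -- base: the init loop establishes the diagonal
    have hdp0 : List.map ((fun _ => List.replicate N (0:Int)) ∘ fun k : Nat => ((k:Nat):Int))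
        (List.range N) = List.replicate N (List.replicate N 0) := by
      simp [Function.comp_def, List.map_const']
    rw [hdp0]
    refine (fun h => ⟨h.1, fun l r hlr hrN hgap => ?_⟩)
      (foldl_range_inv _
        (fun k (dp : List (List Int)) => dimsA dp N ∧
          ∀ i : Nat, i < k → (dp.getD i []).getD i 0 = fS n arr i i)
        _ N ?_ ?_)
    · -- init base
      refine ⟨⟨by simp, fun l hl => ?_⟩, fun i hi => absurd hi (by omega)⟩
      simp [List.getD, hl]
    · -- init step
      intro k dp hk hQ
      obtain ⟨⟨hlen, hrow⟩, hdiag⟩ := hQ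
      simp only [PySem.List.pySetD_natCast, PySem.List.pyGetD_natCast]
      refine ⟨⟨by simpa using hlen, fun l hl => ?_⟩, fun i hi => ?_⟩
      · by_cases hlk : l = k
        · subst hlk
          rw [getD_set_self_int _ _ _ _ (by omega)]
          simpa using hrow l hl
        · rw [getD_set_ne_int _ _ _ _ _ (by omega)]
          exact hrow l hl
      · by_cases hik : i = k
        · subst hik
          rw [getD_set_self_int _ _ _ _ (by omega)]
          rw [getD_set_self_int _ _ _ _ (by rw [hrow i hk]; omega)]
          rw [fS_diag n arr i i le_rfl, PySem.List.pyGetD_natCast]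
        · rw [getD_set_ne_int _ _ _ _ _ (by omega)]
          exact hdiag i (by omega)
    · have hlr' : l = r := by omega
      subst hlr'
      exact h.2 l hrN
  · -- outer step: one pass over interval length 2+k
    intro k dp hk hP
    obtain ⟨⟨hlen, hrow⟩, hvals⟩ := hP
    rw [PySem.List.pyRange_one 0 (n - (2+(k:Int)) + 1)]
    have hM : (n - (2+(k:Int)) + 1 - 0).toNat = N-1-k := by omega
    rw [hM, List.foldl_map]
    refine (fun h => ⟨h.1, fun l r hlr hrN hgap => ?_⟩)
      (foldl_range_inv _
        (fun j (dp : List (List Int)) => dimsA dp N ∧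
          (∀ l r : Nat, l ≤ r → r < N → r - l ≤ k → (dp.getD l []).getD r 0 = fS n arr l r) ∧
          (∀ l : Nat, l < j → (dp.getD l []).getD (l+k+1) 0 = fS n arr l (l+k+1)))
        _ (N-1-k) ?_ ?_)
    · exact ⟨⟨hlen, hrow⟩, hvals, fun l hl => absurd hl (by omega)⟩
    · -- inner step: fill cell (j, j+k+1)
      intro j dp' hj hQ
      obtain ⟨⟨hl2, hr2⟩, hmid, hnew⟩ := hQ
      simp only [zero_add]
      have e1 : (j:Int) + (2+(k:Int)) - 1 = ((j+k+1 : Nat) : Int) := by push_cast; ring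
      have e4 : n - (2+(k:Int)) + 1 = n - (((j+k+1:Nat):Int) - ((j:Nat):Int)) := by
        push_cast; ring
      rw [e1, e4]
      have e2 : ((j+k+1:Nat):Int) - 1 = ((j+k:Nat):Int) := by push_cast; ring
      have e3 : (j:Int) + 1 = ((j+1:Nat):Int) := by push_cast; ring
      rw [e2, e3]
      simp only [PySem.List.pySetD_natCast, PySem.List.pyGetD_natCast]
      refine ⟨⟨by simpa using hl2, fun l hl => ?_⟩, fun l r hlr hrN hgap => ?_, fun l hl => ?_⟩
      · by_cases hlj : l = j
        · subst hlj
          rw [getD_set_self_int _ _ _ _ (by omega)]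
          simpa using hr2 l hl
        · rw [getD_set_ne_int _ _ _ _ _ (by omega)]
          exact hr2 l hl
      · by_cases hlj : l = j
        · subst hlj
          rw [getD_set_self_int _ _ _ _ (by omega)]
          rw [getD_set_ne_int _ _ _ _ _ (by omega)]
          exact hmid l r hlr hrN hgap
        · rw [getD_set_ne_int _ _ _ _ _ (by omega)]
          exact hmid l r hlr hrN hgap
      · by_cases hlj : l = j
        · subst hlj
          rw [getD_set_self_int _ _ _ _ (by omega)]
          rw [getD_set_self_int _ _ _ _ (by rw [hr2 l (by omega)]; omega)]
          rw [hmid (l+1) (l+k+1) (by omega) (by omega) (by omega)]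
          rw [hmid l (l+k) (by omega) (by omega) (by omega)]
          rw [fS_step n arr l (l+k+1) (by omega)]
          have e5 : l+k+1-1 = l+k := by omega
          rw [e5]
          simp only [PySem.List.pyGetD_natCast]
        · rw [getD_set_ne_int _ _ _ _ _ (by omega)]
          exact hnew l (by omega)
    · by_cases hg : r - l ≤ k
      · exact h.2.1 l r hlr hrN hg
      · have hre : r = l+k+1 := by omega
        rw [hre]
        exact h.2.2 l (by omega)

-- ===== VERDICT (by name: the statement is the Claim_ definition above) =====
theorem solution_spec : Claim_equal_solution := by
  intro n arr _hdom hpre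
  unfold Pre_solution at hpre
  unfold Spec_solution
  have hN : ((n.toNat : Nat) : Int) = n := by omega
  rw [a_eq n arr n.toNat hN (by omega), alt_eq n arr n.toNat hN (by omega)]
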